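-- pv_equiv track=rewrite | github.com/SmithSamuelM/mauga | mauga/demoing.py | solution
-- ===== SOURCE A (Python) =====
-- def solution(bits):
--     """
--     returns negative of bits in base -2 array where bits is base -2 array
--     negative of a bit in slot is a bit in the slot and a bit in the next higher slot
--     """
--     bits.extend([0, 0])
--     negs = [0] * len(bits)
--
--     for i, b in enumerate(bits):
--         if b:  # add negated
--             negs[i] += 1
--             negs[i+1] += 1
--
--     for i, n in enumerate(negs):  # normalize
--         while negs[i] >= 2:
--             if negs[i+1]:  # cancel out
--                 negs[i] -= 2
--                 negs[i+1] -= 1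
--             else:  # shift to higher order bits
--                 negs[i] -= 2
--                 negs[i+1] += 1
--                 negs[i+2] += 1
--     return negs
-- ===== SOURCE B (Python) =====
-- def solution(bits):
--     """
--     returns negative of bits in base -2 array where bits is base -2 array
--     (computes the integer value, negates it, and re-converts to negabinary;
--     same in-place extension of bits by [0, 0] as the original)
--     """
--     v = sum((-2) ** i for i, b in enumerate(bits) if b)
--     bits.extend([0, 0])
--     n = -v
--     digits = []
--     while n:
--         n, r = divmod(n, -2)
--         if r < 0:
--             r += 2
--             n += 1
--         digits.append(r)
--     digits.extend([0] * (len(bits) - len(digits)))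
--     return digits
-- ===== Notes on version B (the rewrite author's own statement) =====
-- stated objective: alternative
-- what changed: B replaces A's digit-wise negation (add a bit at slot i and i+1 for every set bit, then a two-pass carry normalization with an inner while loop over the array) by converting the array to its integer value, negating it, and rebuilding the canonical negabinary digits with a single divmod(-2) loop, padded with zeros to len(bits)+2.
import Mathlib
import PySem

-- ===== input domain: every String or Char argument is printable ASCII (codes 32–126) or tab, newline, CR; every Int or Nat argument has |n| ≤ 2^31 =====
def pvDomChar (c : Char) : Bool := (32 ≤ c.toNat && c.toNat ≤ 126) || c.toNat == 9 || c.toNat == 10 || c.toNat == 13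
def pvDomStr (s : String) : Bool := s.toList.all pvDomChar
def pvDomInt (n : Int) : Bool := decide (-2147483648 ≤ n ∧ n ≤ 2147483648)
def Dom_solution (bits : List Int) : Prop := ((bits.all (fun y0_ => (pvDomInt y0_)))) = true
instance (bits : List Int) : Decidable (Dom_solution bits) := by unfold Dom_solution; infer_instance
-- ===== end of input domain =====

-- B negates the array by going through the integer value (convert, negate, rebuild the
-- negabinary digits with a divmod loop, pad to len+2) instead of A's digit-wise
-- negate-and-carry normalization. Both Pythons extend `bits` in place by [0, 0]; the
-- equivalence proved here is about the return value (B performs the same mutation).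

-- ===== PORT A =====
-- inner `while negs[i] >= 2` loop of A's normalization pass.
-- reads/writes use List.getD / List.set: Python indices here are nonnegative, and an
-- out-of-range read yields 0 / an out-of-range write is a no-op (Python would raise
-- there, but such accesses are never reached on any input, as the proofs below show).
-- `fuel` is only a totality guard: negs[i] drops by 2 each iteration, so the
-- (negs[i]).toNat + 1 supplied by `whileNorm` is provably enough (see whileNormF_mid).
def whileNormF (fuel : Nat) (negs : List Int) (i : Nat) : List Int :=
  match fuel with
  | 0 => negs
  | fuel + 1 =>
    if negs.getD i 0 ≥ 2 then
      if negs.getD (i+1) 0 ≠ 0 then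
        whileNormF fuel ((negs.set i (negs.getD i 0 - 2)).set (i+1) (negs.getD (i+1) 0 - 1)) i
      else
        whileNormF fuel (((negs.set i (negs.getD i 0 - 2)).set (i+1) (negs.getD (i+1) 0 + 1)).set
          (i+2) (((negs.set i (negs.getD i 0 - 2)).set (i+1) (negs.getD (i+1) 0 + 1)).getD (i+2) 0 + 1)) i
    else negs

def whileNorm (negs : List Int) (i : Nat) : List Int :=
  whileNormF ((negs.getD i 0).toNat + 1) negs i

-- first pass of A: `for i, b in enumerate(bits): if b: negs[i] += 1; negs[i+1] += 1`
def negAdd (negs : List Int) (i : Nat) : List Int → List Int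
  | [] => negs
  | b :: rest =>
    if b ≠ 0 then
      negAdd ((negs.set i (negs.getD i 0 + 1)).set (i+1)
        ((negs.set i (negs.getD i 0 + 1)).getD (i+1) 0 + 1)) (i+1) rest
    else negAdd negs (i+1) rest

def solution (bits : List Int) : List Int :=
  let bits2 := bits ++ [0, 0]
  let negs0 := List.replicate bits2.length (0 : Int)
  let negs1 := negAdd negs0 0 bits2
  (List.range negs1.length).foldl whileNorm negs1

-- ===== PORT B =====
-- v = sum((-2) ** i for i, b in enumerate(bits) if b)
def sumNeg (acc : Int) (i : Nat) : List Int → Int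
  | [] => acc
  | b :: rest => sumNeg (if b ≠ 0 then acc + (-2)^i else acc) (i+1) rest

-- the divmod loop: while n: n, r = divmod(n, -2); if r < 0: r += 2; n += 1; append r
-- `fuel` is only a totality guard: the measure 2*|n| + [n < 0] strictly drops each
-- iteration (nb_dec1/nb_dec0 below), so the fuel supplied by `nb` is provably enough.
def nbF (fuel : Nat) (n : Int) : List Int :=
  match fuel with
  | 0 => []
  | fuel + 1 =>
    if n = 0 then [] else
      let q := PySem.Int.floordiv n (-2)
      let r := PySem.Int.mod n (-2)
      if r < 0 then (r + 2) :: nbF fuel (q + 1) else r :: nbF fuel q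

def nb (n : Int) : List Int := nbF (2 * n.natAbs + 2) n

def solution_alt (bits : List Int) : List Int :=
  let v := sumNeg 0 0 bits
  let m := bits.length + 2
  let digits := nb (-v)
  digits ++ List.replicate (m - digits.length) 0

-- ===== PRECONDITION & SPEC =====
def Spec_solution (bits : List Int) (out : List Int) : Prop := out = solution_alt bits
instance (bits : List Int) (out : List Int) : Decidable (Spec_solution bits out) := by unfold Spec_solution; infer_instance

-- ===== CLAIM (what is proved, stated in full; the proofs are below) =====
def Claim_equal_solution : Prop := ∀ (bits : List Int), Dom_solution bits → Spec_solution bits (solution bits)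

-- ===== LEMMAS AND PROOFS =====

-- truthiness of an entry as a digit
def tr (b : Int) : Int := if b ≠ 0 then 1 else 0

-- value of a list of base -2 digits (least significant first)
def vl : List Int → Int
  | [] => 0
  | d :: t => d + (-2) * vl t

-- value of the truthy digits of a list
def vt : List Int → Int
  | [] => 0
  | b :: t => tr b + (-2) * vt t

def digits01 (l : List Int) : Prop := ∀ x ∈ l, x = 0 ∨ x = 1

theorem nb_dec_core (q r n add : Int) (h1 : q * (-2) + r = n) (h2 : -2 < r) (h3 : r ≤ 0)
    (hadd : (add = 0 ∧ r = 0) ∨ (add = 1 ∧ r = -1)) (hn : ¬ n = 0) :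
    2 * (q + add).natAbs + (if q + add < 0 then 1 else 0) <
      2 * n.natAbs + (if n < 0 then 1 else 0) := by
  split_ifs <;> rcases hadd with ⟨h, hr⟩ | ⟨h, hr⟩ <;> subst h <;> omega

theorem nb_dec1 (n : Int) (hr : PySem.Int.mod n (-2) < 0) (hn : ¬ n = 0) :
    2 * (PySem.Int.floordiv n (-2) + 1).natAbs +
        (if PySem.Int.floordiv n (-2) + 1 < 0 then 1 else 0) <
      2 * n.natAbs + (if n < 0 then 1 else 0) := by
  have h2 := PySem.Int.mod_neg_bounds n (b := -2) (by norm_num)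
  exact nb_dec_core (PySem.Int.floordiv n (-2)) (PySem.Int.mod n (-2)) n 1
    (PySem.Int.floordiv_mul_add_mod n (-2)) h2.1 h2.2 (Or.inr ⟨rfl, by omega⟩) hn

theorem nb_dec0 (n : Int) (hr : ¬ PySem.Int.mod n (-2) < 0) (hn : ¬ n = 0) :
    2 * (PySem.Int.floordiv n (-2)).natAbs +
        (if PySem.Int.floordiv n (-2) < 0 then 1 else 0) <
      2 * n.natAbs + (if n < 0 then 1 else 0) := by
  have h2 := PySem.Int.mod_neg_bounds n (b := -2) (by norm_num)
  have h := nb_dec_core (PySem.Int.floordiv n (-2)) (PySem.Int.mod n (-2)) n 0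
    (PySem.Int.floordiv_mul_add_mod n (-2)) h2.1 h2.2 (Or.inl ⟨rfl, by omega⟩) hn
  simpa using h


-- result of A's first pass, structurally: slot i holds tr bits[i] + tr bits[i-1]
def zipInit : List Int → Int → List Int
  | [], _ => []
  | b :: t, pend => (pend + tr b) :: zipInit t (tr b)

-- A's inner while at position i, acting on slots (i, i+1, i+2)
def whStep (a b c : Int) : Int × Int × Int :=
  if a ≥ 2 then (if b ≠ 0 then whStep (a-2) (b-1) c else whStep (a-2) (b+1) (c+1))
  else (a, b, c)
  termination_by a.toNat
  decreasing_by all_goals omega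

-- the same while at the second-to-last position (the write to slot i+2 is a no-op)
def whStep2 (a b : Int) : Int × Int :=
  if a ≥ 2 then (if b ≠ 0 then whStep2 (a-2) (b-1) else whStep2 (a-2) (b+1))
  else (a, b)
  termination_by a.toNat
  decreasing_by all_goals omega

-- the same while at the last position (slot i+1 reads as 0, writes are no-ops)
def whStep1 (a : Int) : Int :=
  if a ≥ 2 then whStep1 (a - 2) else a
  termination_by a.toNat
  decreasing_by omega

-- A's normalization pass, structurally
def normGo : List Int → List Int
  | a :: b :: c :: rest =>
    (whStep a b c).1 :: normGo ((whStep a b c).2.1 :: (whStep a b c).2.2 :: rest)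
  | [a, b] => (whStep2 a b).1 :: normGo [(whStep2 a b).2]
  | [a] => [whStep1 a]
  | [] => []
  termination_by l => l.length

def bnd : Nat → Int
  | 0 => 0
  | 1 => 1
  | (k+2) => 2^k

theorem sumNeg_eq (l : List Int) : ∀ (acc : Int) (i : Nat),
    sumNeg acc i l = acc + (-2)^i * vt l := by
  induction l with
  | nil => intro acc i; simp [sumNeg, vt]
  | cons b t ih =>
    intro acc i
    rw [sumNeg, vt, ih]
    by_cases hb : b = 0 <;> simp [hb, tr] <;> ring

theorem vt_append_zero (l : List Int) : vt (l ++ [0]) = vt l := by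
  induction l with
  | nil => simp [vt, tr]
  | cons b t ih => simp [vt, ih]

theorem vt_bound (l : List Int) : -(2^l.length) < vt l ∧ vt l < 2^l.length := by
  induction l with
  | nil => simp [vt]
  | cons b t ih =>
    have htr : tr b = 0 ∨ tr b = 1 := by unfold tr; split <;> simp
    rw [vt]
    simp only [List.length_cons, pow_succ]
    generalize (2:Int)^t.length = A at *
    omega

-- getD / set on an append, at offsets 0, 1, 2 from the prefix length
theorem getD_appk (p x : List Int) (k : Nat) : (p ++ x).getD (p.length + k) 0 = x.getD k 0 := by
  simp [List.getD, List.getElem?_append_right]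

theorem set_appk (p x : List Int) (k : Nat) (v : Int) :
    (p ++ x).set (p.length + k) v = p ++ x.set k v := by
  simp [List.set_append_right]

theorem getD_app0 (p x : List Int) : (p ++ x).getD p.length 0 = x.getD 0 0 := by
  have h := getD_appk p x 0
  simpa using h

theorem getD_app1 (p x : List Int) : (p ++ x).getD (p.length + 1) 0 = x.getD 1 0 :=
  getD_appk p x 1

theorem getD_app2 (p x : List Int) : (p ++ x).getD (p.length + 2) 0 = x.getD 2 0 :=
  getD_appk p x 2

theorem set_app0 (p x : List Int) (v : Int) : (p ++ x).set p.length v = p ++ x.set 0 v := by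
  simpa using set_appk p x 0 v

theorem set_app1 (p x : List Int) (v : Int) : (p ++ x).set (p.length + 1) v = p ++ x.set 1 v :=
  set_appk p x 1 v

theorem set_app2 (p x : List Int) (v : Int) : (p ++ x).set (p.length + 2) v = p ++ x.set 2 v :=
  set_appk p x 2 v

theorem negAdd_eq (l : List Int) : ∀ (p : List Int) (pend : Int), 1 ≤ l.length →
    negAdd (p ++ pend :: List.replicate (l.length - 1) 0) p.length l = p ++ zipInit l pend := by
  induction l with
  | nil => intro p pend h; simp at h
  | cons b t ih =>
    intro p pend _
    cases t with
    | nil =>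
      by_cases hb : b = 0 <;>
        simp [negAdd, hb, zipInit, tr, set_app0, set_app1, List.getD]
    | cons c t' =>
      have hstep : ∀ v w : Int,
          negAdd (p ++ v :: w :: List.replicate t'.length 0) (p.length + 1) (c :: t')
            = p ++ v :: zipInit (c :: t') w := by
        intro v w
        have h := ih (p ++ [v]) w (by simp)
        simpa using h
      simp only [List.length_cons, Nat.add_sub_cancel, List.replicate_succ]
      rw [negAdd]
      by_cases hb : b = 0
      · rw [if_neg (by simp [hb])]
        rw [zipInit, show tr b = 0 from by simp [tr, hb], add_zero]
        exact hstep pend 0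
      · rw [if_pos hb]
        simp only [getD_app0, getD_app1, set_app0, set_app1, List.getD_cons_zero,
          List.getD_cons_succ, List.set_cons_zero, List.set_cons_succ]
        norm_num
        rw [zipInit, show tr b = 1 from by simp [tr, hb]]
        exact hstep (pend + 1) 1

theorem zipInit_length (l : List Int) : ∀ pend, (zipInit l pend).length = l.length := by
  induction l with
  | nil => intro pend; rfl
  | cons b t ih => intro pend; simp [zipInit, ih]

theorem zipInit_nonneg (l : List Int) : ∀ pend, 0 ≤ pend → ∀ x ∈ zipInit l pend, 0 ≤ x := by
  induction l with
  | nil => intro pend _ x hx; simp [zipInit] at hx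
  | cons b t ih =>
    intro pend hp x hx
    have htr : tr b = 0 ∨ tr b = 1 := by unfold tr; split <;> simp
    rw [zipInit] at hx
    rcases List.mem_cons.1 hx with h | h
    · omega
    · exact ih (tr b) (by omega) x h

theorem zipInit_val (l : List Int) : ∀ pend, vl (zipInit (l ++ [0]) pend) = pend - vt l := by
  induction l with
  | nil => intro pend; simp [zipInit, vl, vt, tr]
  | cons b t ih =>
    intro pend
    rw [List.cons_append, zipInit, vl, ih, vt]
    ring

theorem whStep_spec : ∀ (a b c : Int), 0 ≤ a → 0 ≤ b → 0 ≤ c →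
    (((whStep a b c).1 = 0 ∨ (whStep a b c).1 = 1) ∧ 0 ≤ (whStep a b c).2.1 ∧
    0 ≤ (whStep a b c).2.2 ∧
    (whStep a b c).1 - 2 * (whStep a b c).2.1 + 4 * (whStep a b c).2.2 = a - 2*b + 4*c) := by
  intro a b c
  induction a, b, c using whStep.induct with
  | case1 a b c h1 h2 ih =>
    intro ha hb hc
    rw [whStep, if_pos h1, if_pos h2]
    have := ih (by omega) (by omega) (by omega)
    omega
  | case2 a b c h1 h2 ih =>
    intro ha hb hc
    rw [whStep, if_pos h1, if_neg h2]
    have := ih (by omega) (by omega) (by omega)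
    omega
  | case3 a b c h1 =>
    intro ha hb hc
    rw [whStep, if_neg h1]
    dsimp only
    omega

theorem whStep2_spec : ∀ (a b : Int), 0 ≤ a → 0 ≤ b →
    -1 ≤ a - 2*b → a - 2*b ≤ 1 →
    (((whStep2 a b).1 = 0 ∨ (whStep2 a b).1 = 1) ∧ ((whStep2 a b).2 = 0 ∨ (whStep2 a b).2 = 1) ∧
    (whStep2 a b).1 - 2 * (whStep2 a b).2 = a - 2*b) := by
  intro a b
  induction a, b using whStep2.induct with
  | case1 a b h1 h2 ih =>
    intro ha hb hlo hhi
    rw [whStep2, if_pos h1, if_pos h2]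
    have := ih (by omega) (by omega) (by omega) (by omega)
    omega
  | case2 a b h1 h2 ih =>
    intro ha hb hlo hhi
    omega
  | case3 a b h1 =>
    intro ha hb hlo hhi
    rw [whStep2, if_neg h1]
    dsimp only
    omega

theorem whStep1_id (a : Int) (h : a ≤ 1) : whStep1 a = a := by
  rw [whStep1, if_neg (by omega)]

theorem normGo_spec : ∀ (s : List Int), (∀ x ∈ s, 0 ≤ x) →
    -(bnd s.length) ≤ vl s → vl s ≤ bnd s.length →
    digits01 (normGo s) ∧ vl (normGo s) = vl s ∧ (normGo s).length = s.length := by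
  intro s
  induction s using normGo.induct with
  | case1 a b c rest ih =>
    intro hpos hlo hhi
    have ha : 0 ≤ a := hpos a (by simp)
    have hb : 0 ≤ b := hpos b (by simp)
    have hc : 0 ≤ c := hpos c (by simp)
    obtain ⟨hw1, hw2, hw3, hw4⟩ := whStep_spec a b c ha hb hc
    have hvs : vl (a :: b :: c :: rest) = a + (-2) * (b + (-2) * (c + (-2) * vl rest)) := by
      rw [vl, vl, vl]
    have hvt : vl ((whStep a b c).2.1 :: (whStep a b c).2.2 :: rest)
        = (whStep a b c).2.1 + (-2) * ((whStep a b c).2.2 + (-2) * vl rest) := by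
      rw [vl, vl]
    have hrel : vl (a :: b :: c :: rest)
        = (whStep a b c).1 + (-2) * vl ((whStep a b c).2.1 :: (whStep a b c).2.2 :: rest) := by
      rw [hvs, hvt]; ring_nf; omega
    have hbnd : bnd (a :: b :: c :: rest).length = 2 * bnd ((whStep a b c).2.1 :: (whStep a b c).2.2 :: rest).length := by
      simp only [List.length_cons]
      rcases rest with _ | ⟨x, rest'⟩
      · rfl
      · show (2:Int)^(rest'.length + 2) = 2 * 2^(rest'.length + 1)
        ring
    obtain ⟨ihd, ihv, ihl⟩ := ih
      (by
        intro x hx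
        rcases List.mem_cons.1 hx with h | hx
        · omega
        rcases List.mem_cons.1 hx with h | hx
        · omega
        · exact hpos x (by simp [hx]))
      (by rcases hw1 with h | h <;> omega)
      (by rcases hw1 with h | h <;> omega)
    rw [normGo]
    refine ⟨?_, ?_, ?_⟩
    · intro x hx
      rcases List.mem_cons.1 hx with h | hx
      · omega
      · exact ihd x hx
    · rw [vl, ihv]; omega
    · simp [ihl]
  | case2 a b ih =>
    intro hpos hlo hhi
    have ha : 0 ≤ a := hpos a (by simp)
    have hb : 0 ≤ b := hpos b (by simp)
    have hv : vl [a, b] = a - 2 * b := by rw [vl, vl, vl]; ring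
    have hbnd : bnd ([a, b] : List Int).length = 1 := rfl
    obtain ⟨hw1, hw2, hw3⟩ := whStep2_spec a b ha hb (by omega) (by omega)
    rw [normGo, normGo, whStep1_id _ (by omega)]
    refine ⟨?_, ?_, ?_⟩
    · intro x hx
      rcases List.mem_cons.1 hx with h | hx
      · omega
      rcases List.mem_cons.1 hx with h | hx
      · omega
      · simp at hx
    · rw [vl, vl, vl]; omega
    · rfl
  | case3 a =>
    intro hpos hlo hhi
    have ha : 0 ≤ a := hpos a (by simp)
    have hv : vl [a] = a := by rw [vl, vl]; ring
    have hbnd : bnd ([a] : List Int).length = 1 := rfl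
    rw [normGo, whStep1_id _ (by omega)]
    refine ⟨?_, ?_, ?_⟩
    · intro x hx
      rcases List.mem_cons.1 hx with h | hx
      · omega
      · simp at hx
    · rfl
    · rfl
  | case4 =>
    intro _ _ _
    exact ⟨by intro x hx; simp [normGo] at hx, by rw [normGo], by rw [normGo]⟩

theorem whileNormF_mid (p rest : List Int) : ∀ (fuel : Nat) (a b c : Int), a.toNat < fuel →
    whileNormF fuel (p ++ a :: b :: c :: rest) p.length =
      p ++ (whStep a b c).1 :: (whStep a b c).2.1 :: (whStep a b c).2.2 :: rest := by
  intro fuel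
  induction fuel with
  | zero => intro a b c h; omega
  | succ f ih =>
    intro a b c hf
    rw [whileNormF]
    by_cases h1 : a ≥ 2
    · rw [if_pos (by simpa [getD_app0] using h1)]
      by_cases h2 : b ≠ 0
      · rw [if_pos (by simpa [getD_app1, List.getD] using h2)]
        rw [whStep, if_pos h1, if_pos h2]
        simp only [getD_app0, getD_app1, set_app0, set_app1,
          List.getD_cons_zero, List.set_cons_zero]
        simpa [List.getD, List.set] using ih (a - 2) (b - 1) c (by omega)
      · rw [if_neg (by simpa [getD_app1, List.getD] using h2)]
        rw [whStep, if_pos h1, if_neg h2]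
        simp only [getD_app0, getD_app1, getD_app2, set_app0, set_app1, set_app2,
          List.getD_cons_zero, List.set_cons_zero]
        simpa [List.getD, List.set] using ih (a - 2) (b + 1) (c + 1) (by omega)
    · rw [if_neg (by simpa [getD_app0] using h1)]
      rw [whStep, if_neg h1]

theorem whileNorm_mid (p rest : List Int) (a b c : Int) :
    whileNorm (p ++ a :: b :: c :: rest) p.length =
      p ++ (whStep a b c).1 :: (whStep a b c).2.1 :: (whStep a b c).2.2 :: rest := by
  unfold whileNorm
  rw [show (p ++ a :: b :: c :: rest).getD p.length 0 = a from by simp [getD_app0, List.getD]]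
  exact whileNormF_mid p rest _ a b c (by omega)

theorem whileNormF_two (p : List Int) : ∀ (fuel : Nat) (a b : Int), a.toNat < fuel →
    whileNormF fuel (p ++ [a, b]) p.length = p ++ [(whStep2 a b).1, (whStep2 a b).2] := by
  intro fuel
  induction fuel with
  | zero => intro a b h; omega
  | succ f ih =>
    intro a b hf
    rw [whileNormF]
    by_cases h1 : a ≥ 2
    · rw [if_pos (by simpa [getD_app0] using h1)]
      by_cases h2 : b ≠ 0
      · rw [if_pos (by simpa [getD_app1, List.getD] using h2)]
        rw [whStep2, if_pos h1, if_pos h2]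
        simp only [getD_app0, getD_app1, set_app0, set_app1,
          List.getD_cons_zero, List.set_cons_zero]
        simpa [List.getD, List.set] using ih (a - 2) (b - 1) (by omega)
      · rw [if_neg (by simpa [getD_app1, List.getD] using h2)]
        rw [whStep2, if_pos h1, if_neg h2]
        simp only [getD_app0, getD_app1, getD_app2, set_app0, set_app1, set_app2,
          List.getD_cons_zero, List.set_cons_zero]
        simpa [List.getD, List.set] using ih (a - 2) (b + 1) (by omega)
    · rw [if_neg (by simpa [getD_app0] using h1)]
      rw [whStep2, if_neg h1]

theorem whileNorm_two (p : List Int) (a b : Int) :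
    whileNorm (p ++ [a, b]) p.length = p ++ [(whStep2 a b).1, (whStep2 a b).2] := by
  unfold whileNorm
  rw [show (p ++ [a, b]).getD p.length 0 = a from by simp [getD_app0, List.getD]]
  exact whileNormF_two p _ a b (by omega)

theorem whileNormF_one (p : List Int) : ∀ (fuel : Nat) (a : Int), a.toNat < fuel →
    whileNormF fuel (p ++ [a]) p.length = p ++ [whStep1 a] := by
  intro fuel
  induction fuel with
  | zero => intro a h; omega
  | succ f ih =>
    intro a hf
    rw [whileNormF]
    by_cases h1 : a ≥ 2
    · rw [if_pos (by simpa [getD_app0] using h1)]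
      rw [if_neg (by simp [getD_app1, List.getD])]
      rw [whStep1, if_pos h1]
      simp only [getD_app0, getD_app1, getD_app2, set_app0, set_app1, set_app2,
        List.getD_cons_zero, List.set_cons_zero]
      simpa [List.getD, List.set] using ih (a - 2) (by omega)
    · rw [if_neg (by simpa [getD_app0] using h1)]
      rw [whStep1, if_neg h1]

theorem whileNorm_one (p : List Int) (a : Int) :
    whileNorm (p ++ [a]) p.length = p ++ [whStep1 a] := by
  unfold whileNorm
  rw [show (p ++ [a]).getD p.length 0 = a from by simp [getD_app0, List.getD]]
  exact whileNormF_one p _ a (by omega)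

theorem foldl_whileNorm : ∀ (s : List Int) (p : List Int),
    (List.range' p.length s.length).foldl whileNorm (p ++ s) = p ++ normGo s := by
  intro s
  induction s using normGo.induct with
  | case1 a b c rest ih =>
    intro p
    rw [List.length_cons, List.range'_succ, List.foldl_cons, whileNorm_mid]
    have h := ih (p ++ [(whStep a b c).1])
    rw [normGo]
    simpa using h
  | case2 a b ih =>
    intro p
    rw [show ([a, b] : List Int).length = 2 from rfl, List.range'_succ, List.foldl_cons,
      whileNorm_two]
    have h := ih (p ++ [(whStep2 a b).1])
    rw [normGo]
    simpa using h
  | case3 a =>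
    intro p
    rw [show ([a] : List Int).length = 1 from rfl, List.range'_succ, List.foldl_cons,
      whileNorm_one]
    simp [normGo]
  | case4 =>
    intro p
    simp [normGo]

theorem nbF_canon : ∀ (ds : List Int), digits01 ds → ∀ (fuel : Nat),
    2 * (vl ds).natAbs + (if vl ds < 0 then 1 else 0) < fuel →
    nbF fuel (vl ds) ++ List.replicate (ds.length - (nbF fuel (vl ds)).length) 0 = ds := by
  intro ds
  induction ds with
  | nil =>
    intro _ fuel hf
    obtain ⟨f, rfl⟩ : ∃ f, fuel = f + 1 := ⟨fuel - 1, by omega⟩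
    rw [show vl [] = 0 from rfl, nbF, if_pos rfl]
    simp
  | cons d t ih =>
    intro h fuel hf
    obtain ⟨f, rfl⟩ : ∃ f, fuel = f + 1 := ⟨fuel - 1, by omega⟩
    have hd : d = 0 ∨ d = 1 := h d (by simp)
    have hdt : digits01 t := by intro x hx; exact h x (by simp [hx])
    have hv : vl (d :: t) = d + (-2) * vl t := by rw [vl]
    by_cases hn : vl (d :: t) = 0
    · have hd0 : d = 0 := by omega
      have hvt0 : vl t = 0 := by omega
      rw [hn, nbF, if_pos rfl]
      have ht := ih hdt 1 (by rw [hvt0]; simp)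
      rw [hvt0] at ht
      rw [show nbF 1 0 = [] from rfl] at ht
      simp only [List.nil_append, List.length_nil, Nat.sub_zero] at ht ⊢
      rw [List.length_cons, List.replicate_succ, hd0, ht]
    · rw [nbF, if_neg hn]
      have h1 := PySem.Int.floordiv_mul_add_mod (vl (d :: t)) (-2)
      have h2 := PySem.Int.mod_neg_bounds (vl (d :: t)) (b := -2) (by norm_num)
      by_cases hr : PySem.Int.mod (vl (d :: t)) (-2) < 0
      · rw [if_pos hr]
        have hdec := nb_dec1 (vl (d :: t)) hr hn
        have hrd : PySem.Int.mod (vl (d :: t)) (-2) + 2 = d := by omega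
        have hqd : PySem.Int.floordiv (vl (d :: t)) (-2) + 1 = vl t := by omega
        rw [hrd, hqd]
        rw [hqd] at hdec
        have ht := ih hdt f (by omega)
        simpa [Nat.succ_sub_succ] using congrArg (List.cons d) ht
      · rw [if_neg hr]
        have hdec := nb_dec0 (vl (d :: t)) hr hn
        have hrd : PySem.Int.mod (vl (d :: t)) (-2) = d := by omega
        have hqd : PySem.Int.floordiv (vl (d :: t)) (-2) = vl t := by omega
        rw [hrd, hqd]
        rw [hqd] at hdec
        have ht := ih hdt f (by omega)
        simpa [Nat.succ_sub_succ] using congrArg (List.cons d) ht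

theorem nb_canon (ds : List Int) (h : digits01 ds) :
    nb (vl ds) ++ List.replicate (ds.length - (nb (vl ds)).length) 0 = ds := by
  have hm := nbF_canon ds h (2 * (vl ds).natAbs + 2) (by split_ifs <;> omega)
  simpa [nb] using hm

-- ===== VERDICT (by name: the statement is the Claim_ definition above) =====
theorem solution_spec : Claim_equal_solution := by
  intro bits _
  show solution bits = solution_alt bits
  have hinit : negAdd (List.replicate (bits ++ [0, 0]).length (0:Int)) 0 (bits ++ [0, 0])
      = zipInit (bits ++ [0, 0]) 0 := by
    have h := negAdd_eq (bits ++ [0, 0]) [] 0 (by simp)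
    have hrepl : List.replicate (bits ++ [0, 0]).length (0:Int)
        = (0:Int) :: List.replicate ((bits ++ [0, 0]).length - 1) 0 := by
      simp [List.replicate_succ]
    rw [hrepl]
    simpa using h
  have hslen : (zipInit (bits ++ [0, 0]) 0).length = bits.length + 2 := by
    rw [zipInit_length]; simp
  have hA : solution bits = normGo (zipInit (bits ++ [0, 0]) 0) := by
    show (List.range (negAdd (List.replicate (bits ++ [0, 0]).length (0:Int)) 0
        (bits ++ [0, 0])).length).foldl whileNorm
        (negAdd (List.replicate (bits ++ [0, 0]).length (0:Int)) 0 (bits ++ [0, 0]))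
      = normGo (zipInit (bits ++ [0, 0]) 0)
    rw [hinit, List.range_eq_range']
    have h := foldl_whileNorm (zipInit (bits ++ [0, 0]) 0) []
    simpa using h
  have hvs : vl (zipInit (bits ++ [0, 0]) 0) = -(vt bits) := by
    have h1 : bits ++ [0, 0] = (bits ++ [0]) ++ [0] := by simp
    rw [h1, zipInit_val, vt_append_zero]
    ring
  have hbnd : bnd (zipInit (bits ++ [0, 0]) 0).length = 2 ^ bits.length := by
    rw [hslen]; rfl
  have hvb := vt_bound bits
  obtain ⟨dg, vv, ln⟩ := normGo_spec (zipInit (bits ++ [0, 0]) 0)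
    (zipInit_nonneg _ 0 le_rfl)
    (by rw [hbnd, hvs]; omega)
    (by rw [hbnd, hvs]; omega)
  have hsum : sumNeg 0 0 bits = vt bits := by rw [sumNeg_eq]; simp
  have hB : solution_alt bits = nb (-(vt bits)) ++
      List.replicate ((bits.length + 2) - (nb (-(vt bits))).length) 0 := by
    show nb (-(sumNeg 0 0 bits)) ++
        List.replicate ((bits.length + 2) - (nb (-(sumNeg 0 0 bits))).length) 0 = _
    rw [hsum]
  have hfin := nb_canon (normGo (zipInit (bits ++ [0, 0]) 0)) dg
  rw [vv, hvs, ln, hslen] at hfin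
  rw [hA, hB, hfin]
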